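-- pv_equiv track=rewrite | github.com/Suman1213131/Python-codes | Exercise 5, Task 1.py | get_minimum_sales
-- ===== SOURCE A (Python) =====
-- def get_minimum_sales(sales: list):
--     biggest_sale = max(sales)
--     index_of_lowest_sale = 0
--     for i in range(0,len(sales)):
--         if sales[i] < biggest_sale:
--             biggest_sale = sales[i]
--             index_of_lowest_sale = i
--
--     return (index_of_lowest_sale,biggest_sale)
-- ===== SOURCE B (Python) =====
-- def get_minimum_sales(sales: list):
--     lowest = min(sales)
--     return (sales.index(lowest), lowest)
-- ===== Notes on version B (the rewrite author's own statement) =====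
-- stated objective: idiomatic
-- what changed: Replaces A's manual index loop (seeded from max(sales), tracking a running minimum and its index) with two library operations: min(sales) to get the value, then sales.index() for its first occurrence.
import Mathlib
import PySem

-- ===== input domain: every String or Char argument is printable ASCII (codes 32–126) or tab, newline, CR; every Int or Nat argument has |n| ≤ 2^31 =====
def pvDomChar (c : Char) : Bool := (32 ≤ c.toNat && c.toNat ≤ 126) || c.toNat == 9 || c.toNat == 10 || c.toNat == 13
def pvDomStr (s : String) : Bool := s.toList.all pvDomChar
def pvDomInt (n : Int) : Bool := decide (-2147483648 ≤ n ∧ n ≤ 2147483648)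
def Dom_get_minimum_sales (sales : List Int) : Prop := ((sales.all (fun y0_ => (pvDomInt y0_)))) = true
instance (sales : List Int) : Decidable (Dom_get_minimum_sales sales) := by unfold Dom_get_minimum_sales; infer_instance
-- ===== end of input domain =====

-- B replaces A's single manual loop (seeded from max(sales), tracking running minimum and index)
-- by two library operations: min(sales) then sales.index(min); same O(n) cost, more idiomatic.


-- ===== PORT A =====
-- Port of A: seed from max(sales) (ValueError on [] → excluded by Pre_), then the index loop.
def get_minimum_sales (sales : List Int) : Int × Int :=
  match PySem.List.max? sales (fun x => x) with
  | none => (0, 0)  -- max([]) raises ValueError; excluded by Pre_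
  | some biggest =>
    (PySem.List.pyRange 0 (PySem.List.len sales) 1).foldl
      (fun (st : Int × Int) i =>
        if PySem.List.pyGetD sales i 0 < st.2 then (i, PySem.List.pyGetD sales i 0) else st)
      ((0 : Int), biggest)

-- ===== PORT B =====
-- Port of B: lowest = min(sales); return (sales.index(lowest), lowest).
def get_minimum_sales_alt (sales : List Int) : Int × Int :=
  match PySem.List.min? sales (fun x => x) with
  | none => (0, 0)  -- min([]) raises ValueError; excluded by Pre_
  | some lowest =>
    match PySem.List.index? sales lowest with
    | some k => ((k : Int), lowest)
    | none => (0, 0)  -- unreachable: min(sales) ∈ sales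

-- ===== PRECONDITION & SPEC =====
-- Both A and B raise ValueError on the empty list (max/min of empty sequence).
def Pre_get_minimum_sales (sales : List Int) : Prop := sales ≠ []
instance (sales : List Int) : Decidable (Pre_get_minimum_sales sales) := by unfold Pre_get_minimum_sales; infer_instance
def pvWitness_get_minimum_sales : List Int := [3, 1, 2, 1]
def Spec_get_minimum_sales (sales : List Int) (out : Int × Int) : Prop := out = get_minimum_sales_alt sales
instance (sales : List Int) (out : Int × Int) : Decidable (Spec_get_minimum_sales sales out) := by unfold Spec_get_minimum_sales; infer_instance

-- ===== CLAIM (what is proved, stated in full; the proofs are below) =====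
def Claim_equal_get_minimum_sales : Prop := ∀ (sales : List Int), Dom_get_minimum_sales sales → Pre_get_minimum_sales sales → Spec_get_minimum_sales sales (get_minimum_sales sales)

-- ===== LEMMAS AND PROOFS =====

-- A's loop, rephrased as structural recursion over the suffix still to scan (i = current index).
def pvScan : List Int → Int → Int × Int → Int × Int
  | [], _, st => st
  | v :: t, i, st => pvScan t (i + 1) (if v < st.2 then (i, v) else st)

theorem pvFoldlMinLe (l : List Int) (b : Int) : l.foldl min b ≤ b := by
  induction l generalizing b with
  | nil => simp
  | cons v t ih => exact le_trans (ih (min b v)) (min_le_left b v)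

theorem pvFoldEqScan (suf pre : List Int) (st : Int × Int) :
    (PySem.List.pyRange (pre.length : Int) (PySem.List.len (pre ++ suf)) 1).foldl
      (fun (st : Int × Int) i =>
        if PySem.List.pyGetD (pre ++ suf) i 0 < st.2 then (i, PySem.List.pyGetD (pre ++ suf) i 0) else st)
      st = pvScan suf (pre.length : Int) st := by
  induction suf generalizing pre st with
  | nil => simp [PySem.List.pyRange_one_eq_nil, pvScan]
  | cons v t ih =>
    have hlt : (pre.length : Int) < PySem.List.len (pre ++ v :: t) := by
      simp
    rw [PySem.List.pyRange_one_cons hlt, List.foldl_cons]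
    have hget : PySem.List.pyGetD (pre ++ v :: t) (pre.length : Int) 0 = v := by
      rw [PySem.List.pyGetD_natCast]; simp
    rw [hget, pvScan]
    have h2 := ih (pre ++ [v]) (if v < st.2 then ((pre.length : Int), v) else st)
    simp only [List.append_assoc, List.singleton_append, List.length_append,
      List.length_singleton, Nat.cast_add, Nat.cast_one] at h2
    exact h2

theorem pvScanSpec (suf : List Int) (i idx b : Int) :
    pvScan suf i (idx, b) =
      if suf.foldl min b < b
      then (i + (suf.idxOf (suf.foldl min b) : Int), suf.foldl min b)
      else (idx, b) := by
  induction suf generalizing i idx b with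
  | nil => simp [pvScan]
  | cons v t ih =>
    simp only [pvScan, List.foldl_cons]
    by_cases hv : v < b
    · rw [if_pos hv, ih]
      have hmb : min b v = v := min_eq_right hv.le
      rw [hmb]
      have hle : t.foldl min v ≤ v := pvFoldlMinLe t v
      by_cases ht : t.foldl min v < v
      · rw [if_pos ht, if_pos (lt_trans ht hv)]
        rw [List.idxOf_cons_ne _ (ne_of_gt ht)]
        simp only [Prod.mk.injEq, Nat.succ_eq_add_one, and_true]
        push_cast; ring
      · have hveq : t.foldl min v = v := le_antisymm hle (not_lt.mp ht)
        rw [if_neg ht, hveq, if_pos hv, List.idxOf_cons_self]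
        simp
    · rw [if_neg hv, ih]
      have hmb : min b v = b := min_eq_left (not_lt.mp hv)
      rw [hmb]
      by_cases ht : t.foldl min b < b
      · rw [if_pos ht, if_pos ht]
        have hlt : t.foldl min b < v := lt_of_lt_of_le ht (not_lt.mp hv)
        rw [List.idxOf_cons_ne _ (ne_of_gt hlt)]
        simp only [Prod.mk.injEq, Nat.succ_eq_add_one, and_true]
        push_cast; ring
      · rw [if_neg ht, if_neg ht]

-- ===== VERDICT (by name: the statement is the Claim_ definition above) =====
theorem pvIdxOf?_of_mem (xs : List Int) (v : Int) (h : v ∈ xs) :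
    List.idxOf? v xs = some (xs.idxOf v) := by
  induction xs with
  | nil => simp at h
  | cons x t ih =>
    by_cases hx : x = v
    · subst hx; simp [List.idxOf?_cons]
    · have hv : v ∈ t := by
        rcases List.mem_cons.mp h with h1 | h1
        · exact absurd h1.symm hx
        · exact h1
      simp [List.idxOf?_cons, hx, ih hv]

theorem get_minimum_sales_spec : Claim_equal_get_minimum_sales := by
  intro sales _ hpre
  unfold Spec_get_minimum_sales
  obtain ⟨x, t, rfl⟩ := List.exists_cons_of_ne_nil hpre
  unfold get_minimum_sales get_minimum_sales_alt
  rw [PySem.List.max?_id_cons, PySem.List.min?_id_cons]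
  have hxM : x ≤ List.foldl max x t := (PySem.List.le_foldl_max t x).1
  have hmle : List.foldl min x t ≤ x := pvFoldlMinLe t x
  have hmem : List.foldl min x t ∈ x :: t :=
    PySem.List.min?_mem (PySem.List.min?_id_cons x t)
  have hA := pvFoldEqScan (x :: t) [] ((0 : Int), List.foldl max x t)
  simp only [List.nil_append, List.length_nil, Nat.cast_zero] at hA
  have hfold : (x :: t).foldl min (List.foldl max x t) = List.foldl min x t := by
    simp only [List.foldl_cons]
    rw [min_eq_right hxM]
  simp only [hA, pvScanSpec, hfold, PySem.List.index?_eq_idxOf?,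
    pvIdxOf?_of_mem _ _ hmem]
  by_cases hlt : List.foldl min x t < List.foldl max x t
  · rw [if_pos hlt]
    simp
  · have heq : List.foldl min x t = List.foldl max x t :=
      le_antisymm (le_trans hmle hxM) (not_lt.mp hlt)
    have hxm : x = List.foldl min x t := le_antisymm (heq ▸ hxM) hmle
    rw [if_neg hlt, ← heq, ← hxm]
    simp [List.idxOf_cons_self]
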